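-- pv_equiv track=rewrite | github.com/Cichyp648/PodstawyProgramowania | 04-Functions/RepeatedDigits.py | repetitions
-- ===== SOURCE A (Python) =====
-- def repetitions(number):
--     num_str = str(number)
--     digit_count = {}
--     total_sum = 0
--
--     for digit in num_str:
--         if digit in digit_count:
--             digit_count[digit] += 1
--         else:
--             digit_count[digit] = 1
--
--     for digit, count in digit_count.items():
--         if count > 1:
--             total_sum += int(digit) * (count - 1)
--
--     return total_sum
-- ===== SOURCE B (Python) =====
-- def repetitions(number):
--     s = str(number)
--     return sum(int(d) for d in s if d.isdigit()) - sum(int(d) for d in set(s) if d.isdigit())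
-- ===== Notes on version B (the rewrite author's own statement) =====
-- stated objective: alternative
-- what changed: Replaces A's explicit counting dict plus a second pass over its items by the identity 'sum every digit occurrence, then subtract each distinct digit once', using a set and no counts at all.
import Mathlib
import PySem

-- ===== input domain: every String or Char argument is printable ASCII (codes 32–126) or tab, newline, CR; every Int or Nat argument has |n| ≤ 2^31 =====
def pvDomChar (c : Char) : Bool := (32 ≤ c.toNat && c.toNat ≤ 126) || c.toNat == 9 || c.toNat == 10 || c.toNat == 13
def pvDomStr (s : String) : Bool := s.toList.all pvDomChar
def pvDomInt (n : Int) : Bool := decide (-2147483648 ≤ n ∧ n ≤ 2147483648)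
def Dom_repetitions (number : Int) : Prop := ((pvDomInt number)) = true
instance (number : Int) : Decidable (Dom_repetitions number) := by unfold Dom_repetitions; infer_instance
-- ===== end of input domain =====

-- B replaces A's counting dict + items pass by "sum every digit occurrence, subtract each
-- distinct digit once" (alternative algorithm, no counts kept).

-- ===== PORT A =====
-- int(digit) for a single character, ported as its digit value: exact on '0'..'9', the only
-- characters this call ever receives (in str(int) the sole non-digit '-' occurs at most once,
-- so it never reaches the count > 1 branch; see pv_count_le_one_of_not_digit below).
def pvCharVal (c : Char) : Int := (c.toNat : Int) - 48

def repetitions (number : Int) : Int :=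
  let numStr := PySem.Int.toChars number
  let digitCount : PySem.Dict Char Int :=
    numStr.foldl (fun d digit =>
      if d.contains digit then d.insert digit (d.getD digit 0 + 1)
      else d.insert digit 1) PySem.Dict.empty
  digitCount.items.foldl (fun totalSum p =>
      if p.2 > 1 then totalSum + pvCharVal p.1 * (p.2 - 1) else totalSum) 0

-- ===== PORT B =====
-- int(d) under the isdigit filter is exactly the digit value pvCharVal.
def repetitions_alt (number : Int) : Int :=
  let s := PySem.Int.toChars number
  ((s.filter PySem.Chars.isdigit).map pvCharVal).sum
    - (((PySem.Set.ofList s).filter PySem.Chars.isdigit).map pvCharVal).sum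

-- ===== PRECONDITION & SPEC =====
def Spec_repetitions (number : Int) (out : Int) : Prop := out = repetitions_alt number
instance (number : Int) (out : Int) : Decidable (Spec_repetitions number out) := by unfold Spec_repetitions; infer_instance

-- ===== CLAIM (what is proved, stated in full; the proofs are below) =====
def Claim_equal_repetitions : Prop := ∀ (number : Int), Dom_repetitions number → Spec_repetitions number (repetitions number)

-- ===== LEMMAS AND PROOFS =====

lemma pv_digitChar_isdigit (m : Nat) (h : m < 10) :
    PySem.Chars.isdigit (Nat.digitChar m) = true := by
  interval_cases m <;> decide

lemma pv_toDigitsCore_mem (f n : Nat) (acc : List Char) :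
    ∀ c ∈ Nat.toDigitsCore 10 f n acc, c ∈ acc ∨ PySem.Chars.isdigit c = true := by
  induction f generalizing n acc with
  | zero => intro c hc; exact Or.inl hc
  | succ f ih =>
    intro c hc
    simp only [Nat.toDigitsCore] at hc
    by_cases h0 : n / 10 = 0
    · simp only [h0] at hc
      rcases List.mem_cons.mp hc with h | h
      · exact Or.inr (h ▸ pv_digitChar_isdigit _ (Nat.mod_lt _ (by norm_num)))
      · exact Or.inl h
    · simp only [h0] at hc
      rcases ih (n / 10) (Nat.digitChar (n % 10) :: acc) c hc with h | h
      · rcases List.mem_cons.mp h with h | h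
        · exact Or.inr (h ▸ pv_digitChar_isdigit _ (Nat.mod_lt _ (by norm_num)))
        · exact Or.inl h
      · exact Or.inr h

lemma pv_toDigits_isdigit (n : Nat) : ∀ c ∈ Nat.toDigits 10 n, PySem.Chars.isdigit c = true := by
  intro c hc
  rcases pv_toDigitsCore_mem (n + 1) n [] c hc with h | h
  · exact absurd h (List.not_mem_nil)
  · exact h

-- the only non-digit character of str(int) is a single leading '-'
lemma pv_count_le_one_of_not_digit (n : Int) (c : Char)
    (hc : PySem.Chars.isdigit c = false) : (PySem.Int.toChars n).count c ≤ 1 := by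
  have hnot : ∀ m : Nat, c ∉ Nat.toDigits 10 m := by
    intro m hm
    have := pv_toDigits_isdigit m c hm
    simp [hc] at this
  unfold PySem.Int.toChars
  split
  · rw [List.count_cons]
    rw [List.count_eq_zero_of_not_mem (hnot _)]
    split <;> omega
  · rw [List.count_eq_zero_of_not_mem (hnot _)]
    omega

lemma pv_map_filter_sum (cs : List Char) (p : Char → Bool) (v : Char → Int) :
    ((cs.filter p).map v).sum = (cs.map (fun c => if p c then v c else 0)).sum := by
  induction cs with
  | nil => rfl
  | cons c t ih =>
    by_cases h : p c = true
    · simp [h, ih]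
    · simp only [Bool.not_eq_true] at h
      simp [h, ih]

-- sum over a list = count-weighted sum over its Finset of members
lemma pv_sum_map_eq_finset (cs : List Char) (g : Char → Int) :
    (cs.map g).sum = ∑ x ∈ cs.toFinset, (cs.count x : Int) * g x := by
  have h := Finset.sum_multiset_map_count (cs : Multiset Char) g
  simp only [Multiset.map_coe, Multiset.sum_coe, Multiset.coe_count] at h
  rw [show ((cs : Multiset Char).toFinset) = cs.toFinset from rfl] at h
  rw [h]
  refine Finset.sum_congr rfl ?_
  intro x _
  simp

lemma pv_ofList_toFinset (cs : List Char) : (PySem.Set.ofList cs).toFinset = cs.toFinset := by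
  apply Finset.ext
  intro x
  simp [List.mem_toFinset, PySem.Set.mem_ofList]

-- the central identity, for any character list whose non-digit members occur at most once
lemma pv_main (cs : List Char)
    (H : ∀ c, PySem.Chars.isdigit c = false → cs.count c ≤ 1) :
    ((PySem.Set.ofList cs).map (fun k =>
        if ((cs.count k : Int)) > 1 then pvCharVal k * ((cs.count k : Int) - 1) else 0)).sum
      = ((cs.filter PySem.Chars.isdigit).map pvCharVal).sum
        - (((PySem.Set.ofList cs).filter PySem.Chars.isdigit).map pvCharVal).sum := by
  set S := PySem.Set.ofList cs with hS
  have hnd : S.Nodup := PySem.Set.nodup_ofList cs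
  -- left side as a Finset sum
  have hL := List.sum_toFinset (l := S)
      (fun k => if ((cs.count k : Int)) > 1 then pvCharVal k * ((cs.count k : Int) - 1) else 0) hnd
  -- first right term as a count-weighted Finset sum
  rw [pv_map_filter_sum cs PySem.Chars.isdigit pvCharVal,
      pv_sum_map_eq_finset cs (fun c => if PySem.Chars.isdigit c then pvCharVal c else 0)]
  -- second right term as a Finset sum
  have hnd2 : (S.filter PySem.Chars.isdigit).Nodup := hnd.filter _
  have hR2 := List.sum_toFinset (l := S.filter PySem.Chars.isdigit) pvCharVal hnd2
  rw [← hL, ← hR2, List.toFinset_filter, pv_ofList_toFinset,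
      Finset.sum_filter, ← Finset.sum_sub_distrib]
  refine Finset.sum_congr rfl ?_
  intro x hx
  have hmem : x ∈ cs := List.mem_toFinset.mp hx
  have hpos : 1 ≤ cs.count x := List.count_pos_iff.mpr hmem
  by_cases hd : PySem.Chars.isdigit x = true
  · simp only [hd, ite_true]
    by_cases h2 : ((cs.count x : Int)) > 1
    · rw [if_pos h2]; ring
    · have : cs.count x = 1 := by omega
      rw [if_neg h2, this]; push_cast; ring
  · simp only [Bool.not_eq_true] at hd
    have h1 : cs.count x = 1 := le_antisymm (H x hd) hpos
    simp [hd, h1]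

-- A's counting loop is Counter(num_str)
lemma pv_dict_eq_counter (cs : List Char) :
    cs.foldl (fun d digit =>
        if d.contains digit then d.insert digit (d.getD digit 0 + 1)
        else d.insert digit 1) (PySem.Dict.empty : PySem.Dict Char Int)
      = PySem.Dict.counter cs := by
  rw [PySem.Dict.counter_eq_foldl]
  apply PySem.List.foldl_congr_mem
  intro d x _
  by_cases hc : d.contains x = true
  · have hs : (d.get? x).isSome := by rw [← PySem.Dict.contains_eq_isSome_get?, hc]
    rcases Option.isSome_iff_exists.mp hs with ⟨v, hv⟩
    simp [hc, PySem.Dict.modify]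
  · simp only [Bool.not_eq_true] at hc
    have hn : d.get? x = none := by
      have := PySem.Dict.contains_eq_isSome_get? d x
      rw [hc] at this
      exact Option.not_isSome_iff_eq_none.mp (by simp [← this])
    simp [hc, PySem.Dict.modify, PySem.Dict.getD, hn]

-- ===== VERDICT (by name: the statement is the Claim_ definition above) =====
theorem repetitions_spec : Claim_equal_repetitions := by
  intro number _
  unfold Spec_repetitions repetitions repetitions_alt
  simp only []
  rw [pv_dict_eq_counter, PySem.Dict.items_counter, List.foldl_map]
  rw [PySem.List.foldl_congr_mem _ _
      (fun (acc : Int) (k : Char) =>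
        acc + (if (((PySem.Int.toChars number).count k : Int)) > 1
               then pvCharVal k * (((PySem.Int.toChars number).count k : Int) - 1) else 0)) 0
      (by intro acc x _
          by_cases h : (1:Int) < ((PySem.Int.toChars number).count x : Int) <;> simp [h])]
  rw [PySem.List.foldl_add, zero_add]
  exact pv_main (PySem.Int.toChars number)
    (fun c hc => pv_count_le_one_of_not_digit number c hc)
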